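-- pv_equiv track=rewrite | github.com/yizenglistat/apriori-recommendation | apriori.py | size1freqset
-- ===== SOURCE A (Python) =====
-- def size1freqset(minsupport,nbuckets,buckets):
--
--     "Creating Candidate List of Size 1"
--     candidatelist1=[]
--     finalist1=[]
--     finalfreq1={}
--
--     for i in range(0, len(buckets)):
--         for b in buckets[i]:
--             candidatelist1.append(b)
--
--     candidatelist1=sorted(set(candidatelist1))
--
--     "Appending frequent items of size 1 to finallist1"
--     lala=0
--     for k in candidatelist1:
--         for i in range(0, len(buckets)):
--             for j in buckets[i]:
--                 if(k==j):
--                     lala+=1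
--         if lala>=minsupport:
--             finalist1.append(k)
--             finalfreq1[(k,)]=lala
--         lala=0
--
--     itemiddic={}
--     counter=1
--     for c in candidatelist1:
--         itemiddic[c]=counter
--         counter+=1
--
--     return itemiddic, finalist1, finalfreq1
-- ===== SOURCE B (Python) =====
-- def size1freqset(minsupport, nbuckets, buckets):
--     "Faster: flatten, sort the multiset once, then one grouped sweep over runs."
--     flat = sorted(x for bucket in buckets for x in bucket)
--     itemiddic = {}
--     finalist1 = []
--     finalfreq1 = {}
--     cid = 1
--     i, n = 0, len(flat)
--     while i < n:
--         item = flat[i]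
--         j = i + 1
--         while j < n and flat[j] == item:
--             j += 1
--         cnt = j - i
--         itemiddic[item] = cid
--         cid += 1
--         if cnt >= minsupport:
--             finalist1.append(item)
--             finalfreq1[(item,)] = cnt
--         i = j
--     return itemiddic, finalist1, finalfreq1
-- ===== Notes on version B (the rewrite author's own statement) =====
-- stated objective: faster
-- what changed: B flattens all buckets into one multiset, sorts it once, and sweeps it in a single pass grouping consecutive equal items (assigning ids and counts per run), instead of A's per-candidate rescan of every bucket.
import Mathlib
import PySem

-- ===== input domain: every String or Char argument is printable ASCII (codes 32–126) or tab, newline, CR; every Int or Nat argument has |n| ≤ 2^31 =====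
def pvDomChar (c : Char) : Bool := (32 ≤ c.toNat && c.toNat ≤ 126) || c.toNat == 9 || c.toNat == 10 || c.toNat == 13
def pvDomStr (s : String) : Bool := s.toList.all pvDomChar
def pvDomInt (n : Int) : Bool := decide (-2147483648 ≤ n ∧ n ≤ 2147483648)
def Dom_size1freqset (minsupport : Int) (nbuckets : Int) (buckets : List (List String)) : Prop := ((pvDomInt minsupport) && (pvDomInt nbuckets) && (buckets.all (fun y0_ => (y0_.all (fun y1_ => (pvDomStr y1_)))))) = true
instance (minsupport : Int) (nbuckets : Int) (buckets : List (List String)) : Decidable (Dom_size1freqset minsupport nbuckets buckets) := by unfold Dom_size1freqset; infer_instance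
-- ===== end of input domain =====

-- B replaces A's per-candidate rescan of every bucket by one sort of the flattened
-- multiset followed by a single grouped sweep (objective: faster).

-- ===== PORT A =====
def size1freqset (minsupport : Int) (nbuckets : Int) (buckets : List (List String)) : (List (String × Int)) × List String × (List (List String × Int)) :=
  -- candidatelist1 = [] ; for i in range(0, len(buckets)): for b in buckets[i]: candidatelist1.append(b)
  let candidatelist0 : List String :=
    (PySem.List.pyRange 0 (PySem.List.len buckets)).foldl
      (fun acc i => (PySem.List.pyGetD buckets i []).foldl (fun a b => a ++ [b]) acc) []
  -- candidatelist1 = sorted(set(candidatelist1))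
  let candidatelist1 : List String := PySem.List.sorted (PySem.Set.ofList candidatelist0) (fun x => x)
  -- for k in candidatelist1: count lala over all buckets, append if lala >= minsupport
  let st : List String × PySem.Dict (List String) Int :=
    candidatelist1.foldl
      (fun st k =>
        if ((PySem.List.pyRange 0 (PySem.List.len buckets)).foldl
              (fun l i => (PySem.List.pyGetD buckets i []).foldl
                  (fun l j => if k == j then l + 1 else l) l) 0) ≥ minsupport then
          (st.1 ++ [k],
           st.2.insert [k]
             ((PySem.List.pyRange 0 (PySem.List.len buckets)).foldl
               (fun l i => (PySem.List.pyGetD buckets i []).foldl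
                   (fun l j => if k == j then l + 1 else l) l) 0))
        else st)
      ([], PySem.Dict.empty)
  -- itemiddic = {}; counter = 1; for c in candidatelist1: itemiddic[c] = counter; counter += 1
  let st3 : PySem.Dict String Int × Int :=
    candidatelist1.foldl (fun p c => (p.1.insert c p.2, p.2 + 1)) (PySem.Dict.empty, 1)
  (st3.1.items, st.1, st.2.items)

-- ===== PORT B =====
-- the grouped sweep over the sorted multiset: take the run of the head item,
-- assign it the next id, record it if its run length reaches minsupport, continue after the run
def altSweep (minsupport : Int) (s : List String) (cid : Int)
    (d : PySem.Dict String Int) (fl : List String) (ff : PySem.Dict (List String) Int) :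
    PySem.Dict String Int × List String × PySem.Dict (List String) Int :=
  match s with
  | [] => (d, fl, ff)
  | x :: rest =>
      if (1 + ((rest.takeWhile (fun y => y == x)).length : Int)) ≥ minsupport then
        altSweep minsupport (rest.dropWhile (fun y => y == x)) (cid + 1) (d.insert x cid)
          (fl ++ [x]) (ff.insert [x] (1 + ((rest.takeWhile (fun y => y == x)).length : Int)))
      else
        altSweep minsupport (rest.dropWhile (fun y => y == x)) (cid + 1) (d.insert x cid) fl ff
  termination_by s.length
  decreasing_by
    all_goals
      have h := List.length_dropWhile_le (fun y => y == x) rest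
      simp only [List.length_cons]; omega

def size1freqset_alt (minsupport : Int) (nbuckets : Int) (buckets : List (List String)) : (List (String × Int)) × List String × (List (List String × Int)) :=
  -- flat = sorted(x for bucket in buckets for x in bucket)
  let flat : List String := PySem.List.sorted (buckets.flatMap (fun bucket => bucket)) (fun x => x)
  let r := altSweep minsupport flat 1 PySem.Dict.empty [] PySem.Dict.empty
  (r.1.items, r.2.1, r.2.2.items)

-- ===== PRECONDITION & SPEC =====
def Spec_size1freqset (minsupport : Int) (nbuckets : Int) (buckets : List (List String)) (out : (List (String × Int)) × List String × (List (List String × Int))) : Prop := out = size1freqset_alt minsupport nbuckets buckets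
instance (minsupport : Int) (nbuckets : Int) (buckets : List (List String)) (out : (List (String × Int)) × List String × (List (List String × Int))) : Decidable (Spec_size1freqset minsupport nbuckets buckets out) := by unfold Spec_size1freqset; infer_instance

-- ===== CLAIM (what is proved, stated in full; the proofs are below) =====
def Claim_equal_size1freqset : Prop := ∀ (minsupport : Int) (nbuckets : Int) (buckets : List (List String)), Dom_size1freqset minsupport nbuckets buckets → Spec_size1freqset minsupport nbuckets buckets (size1freqset minsupport nbuckets buckets)

-- ===== LEMMAS AND PROOFS =====

-- the runs (item, run length) of a list, grouping maximal blocks of consecutive equal items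
def pvRuns : List String → List (String × Nat)
  | [] => []
  | x :: rest =>
      (x, 1 + (rest.takeWhile (fun y => y == x)).length) :: pvRuns (rest.dropWhile (fun y => y == x))
  termination_by s => s.length
  decreasing_by
    have h := List.length_dropWhile_le (fun y => y == x) rest
    simp only [List.length_cons]; omega

-- consecutive ids starting at i
def pvIds : List String → Int → List (String × Int)
  | [], _ => []
  | x :: t, i => (x, i) :: pvIds t (i + 1)

theorem pvRuns_fst_mem (s : List String) (p : String × Nat) (hp : p ∈ pvRuns s) : p.1 ∈ s := by
  induction s using pvRuns.induct generalizing p with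
  | case1 => simp [pvRuns] at hp
  | case2 x rest ih =>
      rw [pvRuns] at hp
      rcases List.mem_cons.mp hp with h | h
      · simp [h]
      · exact List.mem_cons_of_mem x ((List.dropWhile_sublist _).mem (ih p h))

theorem mem_pvRuns_fst (s : List String) (k : String) : k ∈ (pvRuns s).map Prod.fst ↔ k ∈ s := by
  induction s using pvRuns.induct with
  | case1 => simp [pvRuns]
  | case2 x rest ih =>
      rw [pvRuns]
      simp only [List.map_cons, List.mem_cons, ih]
      constructor
      · rintro (h | h)
        · simp [h]
        · exact Or.inr ((List.dropWhile_sublist _).mem h)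
      · rintro (h | h)
        · exact Or.inl h
        · rw [← List.takeWhile_append_dropWhile (p := fun y => y == x) (l := rest)] at h
          rcases List.mem_append.mp h with h | h
          · exact Or.inl (by simpa using List.mem_takeWhile_imp h)
          · exact Or.inr h

theorem not_mem_dropWhile_sorted (x : String) (rest : List String)
    (h : (x :: rest).Pairwise (· ≤ ·)) : x ∉ rest.dropWhile (fun y => y == x) := by
  induction rest with
  | nil => simp
  | cons y t ih =>
      rw [List.dropWhile_cons]
      by_cases hyx : (y == x) = true
      · simp only [hyx, if_true]
        have hy : y = x := by simpa using hyx
        apply ih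
        subst hy
        rcases List.pairwise_cons.mp h with ⟨h1, h2⟩
        rcases List.pairwise_cons.mp h2 with ⟨h3, h4⟩
        exact List.pairwise_cons.mpr ⟨h3, h4⟩
      · simp only [hyx]
        intro hmem
        rcases List.mem_cons.mp hmem with h1 | h1
        · exact hyx (by simp [h1])
        · rcases List.pairwise_cons.mp h with ⟨ha, hb⟩
          rcases List.pairwise_cons.mp hb with ⟨hc, _⟩
          exact hyx (by simp [le_antisymm (hc x h1) (ha y (by simp))])

theorem pvRuns_pairwise_lt (s : List String) (hs : s.Pairwise (· ≤ ·)) :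
    ((pvRuns s).map Prod.fst).Pairwise (· < ·) := by
  induction s using pvRuns.induct with
  | case1 => simp [pvRuns]
  | case2 x rest ih =>
      rw [pvRuns]
      simp only [List.map_cons]
      rcases List.pairwise_cons.mp hs with ⟨hle, hrest⟩
      have hdrop : (rest.dropWhile (fun y => y == x)).Pairwise (· ≤ ·) :=
        hrest.sublist (List.dropWhile_sublist _)
      refine List.pairwise_cons.mpr ⟨?_, ih hdrop⟩
      intro k hk
      have hkmem : k ∈ rest.dropWhile (fun y => y == x) := (mem_pvRuns_fst _ k).mp hk
      have hkx : k ≠ x := fun h => not_mem_dropWhile_sorted x rest hs (h ▸ hkmem)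
      exact lt_of_le_of_ne (hle k ((List.dropWhile_sublist _).mem hkmem)) (Ne.symm hkx)

theorem pvRuns_count (s : List String) (hs : s.Pairwise (· ≤ ·)) :
    ∀ p ∈ pvRuns s, p.2 = s.count p.1 := by
  induction s using pvRuns.induct with
  | case1 => simp [pvRuns]
  | case2 x rest ih =>
      rw [pvRuns]
      rcases List.pairwise_cons.mp hs with ⟨hle, hrest⟩
      have hdrop : (rest.dropWhile (fun y => y == x)).Pairwise (· ≤ ·) :=
        hrest.sublist (List.dropWhile_sublist _)
      have hxnot : x ∉ rest.dropWhile (fun y => y == x) := not_mem_dropWhile_sorted x rest hs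
      have htake : ∀ b ∈ rest.takeWhile (fun y => y == x), x = b := fun b hb => by
        have hb' := List.mem_takeWhile_imp hb
        simp only [beq_iff_eq] at hb'
        exact hb'.symm
      intro p hp
      rcases List.mem_cons.mp hp with h | h
      · subst h
        dsimp only
        conv_rhs => rw [← List.takeWhile_append_dropWhile (p := fun y => y == x) (l := rest)]
        rw [List.count_cons_self, List.count_append,
          List.count_eq_length.mpr htake, List.count_eq_zero.mpr hxnot]
        omega
      · have hp1 : p.1 ∈ rest.dropWhile (fun y => y == x) := pvRuns_fst_mem _ p h
        have hp1x : p.1 ≠ x := fun hx => hxnot (hx ▸ hp1)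
        rw [ih hdrop p h]
        conv_rhs => rw [← List.takeWhile_append_dropWhile (p := fun y => y == x) (l := rest)]
        rw [List.count_cons_of_ne (Ne.symm hp1x), List.count_append]
        have hz : List.count p.1 (rest.takeWhile (fun y => y == x)) = 0 :=
          List.count_eq_zero.mpr (fun hm => hp1x (by simpa using List.mem_takeWhile_imp hm))
        omega

theorem sweep_spec (m : Int) (s : List String) (cid : Int) (d : PySem.Dict String Int)
    (fl : List String) (ff : PySem.Dict (List String) Int)
    (hnd : ((pvRuns s).map Prod.fst).Nodup)
    (hd : ∀ k ∈ (pvRuns s).map Prod.fst, d.contains k = false)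
    (hf : ∀ k ∈ (pvRuns s).map Prod.fst, ff.contains [k] = false) :
    (altSweep m s cid d fl ff).1.items = d.items ++ pvIds ((pvRuns s).map Prod.fst) cid ∧
    (altSweep m s cid d fl ff).2.1
      = fl ++ ((pvRuns s).filter (fun p => ((p.2 : Int)) ≥ m)).map Prod.fst ∧
    (altSweep m s cid d fl ff).2.2.items
      = ff.items ++ ((pvRuns s).filter (fun p => ((p.2 : Int)) ≥ m)).map (fun p => ([p.1], (p.2 : Int))) := by
  induction s using pvRuns.induct generalizing cid d fl ff with
  | case1 => simp [altSweep, pvRuns, pvIds]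
  | case2 x rest ih =>
      rw [pvRuns] at hnd hd hf ⊢
      simp only [List.map_cons, List.nodup_cons] at hnd
      have hxd : d.contains x = false := hd x (by simp)
      have hxf : ff.contains [x] = false := hf x (by simp)
      have hd' : ∀ k ∈ (pvRuns (rest.dropWhile (fun y => y == x))).map Prod.fst,
          (d.insert x cid).contains k = false := by
        intro k hk
        rw [PySem.Dict.contains_insert]
        have hkx : k ≠ x := fun h => hnd.1 (h ▸ hk)
        simp [hkx, hd k (by simp [hk])]
      have hcast : ((1 + (rest.takeWhile (fun y => y == x)).length : Nat) : Int)
          = 1 + ((rest.takeWhile (fun y => y == x)).length : Int) := by push_cast; ring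
      rw [altSweep]
      by_cases hc : (1 + ((rest.takeWhile (fun y => y == x)).length : Int)) ≥ m
      · have hf' : ∀ k ∈ (pvRuns (rest.dropWhile (fun y => y == x))).map Prod.fst,
            (ff.insert [x] (1 + ((rest.takeWhile (fun y => y == x)).length : Int))).contains [k] = false := by
          intro k hk
          rw [PySem.Dict.contains_insert]
          have hkx : k ≠ x := fun h => hnd.1 (h ▸ hk)
          simp [hkx, hf k (by simp [hk])]
        have ih' := ih (cid + 1) (d.insert x cid) (fl ++ [x])
          (ff.insert [x] (1 + ((rest.takeWhile (fun y => y == x)).length : Int))) hnd.2 hd' hf'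
        rw [if_pos hc]
        refine ⟨?_, ?_, ?_⟩
        · rw [ih'.1, PySem.Dict.items_insert_of_not_contains d cid hxd]
          simp [pvIds]
        · rw [ih'.2.1]
          rw [List.filter_cons_of_pos (by simpa [hcast] using hc)]
          simp
        · rw [ih'.2.2, PySem.Dict.items_insert_of_not_contains ff _ hxf]
          rw [List.filter_cons_of_pos (by simpa [hcast] using hc)]
          simp [hcast]
      · have ih' := ih (cid + 1) (d.insert x cid) fl ff hnd.2 hd'
          (fun k hk => hf k (by simp [hk]))
        rw [if_neg hc]
        refine ⟨?_, ?_, ?_⟩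
        · rw [ih'.1, PySem.Dict.items_insert_of_not_contains d cid hxd]
          simp [pvIds]
        · rw [ih'.2.1, List.filter_cons_of_neg (by simpa [hcast] using hc)]
        · rw [ih'.2.2, List.filter_cons_of_neg (by simpa [hcast] using hc)]


theorem loop2_eq (m : Int) (cnt : String → Int) (c : List String) (fl : List String)
    (ff : PySem.Dict (List String) Int) (hnd : c.Nodup)
    (hf : ∀ k ∈ c, ff.contains [k] = false) :
    (c.foldl (fun st k => if cnt k ≥ m then (st.1 ++ [k], st.2.insert [k] (cnt k)) else st)
        (fl, ff)).1
      = fl ++ c.filter (fun k => cnt k ≥ m) ∧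
    (c.foldl (fun st k => if cnt k ≥ m then (st.1 ++ [k], st.2.insert [k] (cnt k)) else st)
        (fl, ff)).2.items
      = ff.items ++ (c.filter (fun k => cnt k ≥ m)).map (fun k => ([k], cnt k)) := by
  induction c generalizing fl ff with
  | nil => simp
  | cons x t ih =>
      have hne : ∀ k ∈ t, k ≠ x := fun k hk hkx => (List.nodup_cons.mp hnd).1 (hkx ▸ hk)
      by_cases hc : cnt x ≥ m
      · simp only [List.foldl_cons, if_pos hc]
        have ih' := ih (fl ++ [x]) (ff.insert [x] (cnt x)) hnd.of_cons (by
          intro k hk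
          rw [PySem.Dict.contains_insert]
          simp [hne k hk, hf k (by simp [hk])])
        rw [ih'.1, ih'.2]
        rw [PySem.Dict.items_insert_of_not_contains ff (cnt x) (hf x (by simp))]
        simp [hc]
      · simp only [List.foldl_cons, if_neg hc]
        have ih' := ih fl ff hnd.of_cons (fun k hk => hf k (by simp [hk]))
        rw [ih'.1, ih'.2]
        simp [hc]

theorem loop3_eq (c : List String) (d : PySem.Dict String Int) (i : Int) (hnd : c.Nodup)
    (hd : ∀ k ∈ c, d.contains k = false) :
    (c.foldl (fun p x => (p.1.insert x p.2, p.2 + 1)) (d, i)).1.items = d.items ++ pvIds c i := by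
  induction c generalizing d i with
  | nil => simp [pvIds]
  | cons x t ih =>
      simp only [List.foldl_cons]
      rw [ih (d.insert x i) (i + 1) hnd.of_cons]
      · rw [PySem.Dict.items_insert_of_not_contains d i (hd x (by simp))]
        simp [pvIds]
      · intro k hk
        rw [PySem.Dict.contains_insert]
        have hne : k ≠ x := fun hkx => (List.nodup_cons.mp hnd).1 (hkx ▸ hk)
        simp [hne, hd k (by simp [hk])]

theorem filter_map_fst (m : Int) (cnt : String → Int) (l : List (String × Nat))
    (h : ∀ p ∈ l, (p.2 : Int) = cnt p.1) :
    ((l.filter (fun p => ((p.2 : Int)) ≥ m)).map Prod.fst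
        = (l.map Prod.fst).filter (fun k => cnt k ≥ m)) ∧
    ((l.filter (fun p => ((p.2 : Int)) ≥ m)).map (fun p => ([p.1], (p.2 : Int)))
        = ((l.map Prod.fst).filter (fun k => cnt k ≥ m)).map (fun k => ([k], cnt k))) := by
  induction l with
  | nil => simp
  | cons p t ih =>
      have hp := h p (by simp)
      have ht := ih (fun q hq => h q (by simp [hq]))
      by_cases hc : cnt p.1 ≥ m
      · simp [hp, hc, ht.1, ht.2]
      · simp [hp, hc, ht.1, ht.2]

theorem countA (buckets : List (List String)) (k : String) :
    (PySem.List.pyRange 0 (PySem.List.len buckets)).foldl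
      (fun l i => (PySem.List.pyGetD buckets i []).foldl
          (fun l j => if k == j then l + 1 else l) l) 0
    = (((buckets.flatMap (fun bucket => bucket)).count k : Int)) := by
  rw [PySem.List.foldl_pyRange_zero_pyGetD buckets []
    (fun l bucket => bucket.foldl (fun l j => if k == j then l + 1 else l) l) 0]
  rw [PySem.List.foldl_congr_mem buckets _
    (fun l bucket => l + (List.countP (fun j => k == j) bucket : Int)) 0
    (fun l bucket _ => PySem.List.foldl_count_if (fun j => k == j) bucket l)]
  rw [PySem.List.foldl_add buckets (fun bucket => (List.countP (fun j => k == j) bucket : Int)) 0]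
  rw [List.count, List.countP_flatMap]
  simp only [zero_add]
  have hswap : ∀ bucket : List String,
      List.countP (fun j => k == j) bucket = List.countP (fun j => j == k) bucket :=
    fun bucket => List.countP_congr (fun x _ => by
      constructor <;> (intro h; simp only [beq_iff_eq] at h ⊢; exact h.symm))
  induction buckets with
  | nil => simp
  | cons b bs ih => simp [ih, hswap b]

theorem flattenA (buckets : List (List String)) :
    (PySem.List.pyRange 0 (PySem.List.len buckets)).foldl
      (fun acc i => (PySem.List.pyGetD buckets i []).foldl (fun a b => a ++ [b]) acc) []
    = buckets.flatMap (fun bucket => bucket) := by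
  rw [PySem.List.foldl_pyRange_zero_pyGetD buckets []
    (fun acc bucket => bucket.foldl (fun a b => a ++ [b]) acc) []]
  rw [PySem.List.foldl_congr_mem buckets _ (fun acc bucket => acc ++ bucket) []
    (fun acc bucket _ => PySem.List.foldl_append_singleton bucket acc)]
  rw [PySem.List.foldl_append_eq_flatMap (fun bucket => bucket) buckets []]
  simp

-- ===== VERDICT (by name: the statement is the Claim_ definition above) =====
theorem size1freqset_spec : Claim_equal_size1freqset := by
  intro minsupport nbuckets buckets _
  unfold Spec_size1freqset size1freqset size1freqset_alt
  dsimp only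
  rw [flattenA]
  have hsp : (PySem.List.sorted (buckets.flatMap (fun bucket => bucket)) (fun x => x)).Pairwise (· ≤ ·) :=
    PySem.List.sorted_pairwise (buckets.flatMap (fun bucket => bucket)) (fun x => x)
  set FA := buckets.flatMap (fun bucket => bucket) with hFA
  set s := PySem.List.sorted FA (fun x => x) with hsdef
  set ys := (pvRuns s).map Prod.fst with hys
  have hlt : ys.Pairwise (· < ·) := pvRuns_pairwise_lt s hsp
  have hnd : ys.Nodup := hlt.imp ne_of_lt
  have hperm : ys.Perm (PySem.Set.ofList FA) := by
    refine (List.perm_ext_iff_of_nodup hnd (PySem.Set.nodup_ofList FA)).mpr ?_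
    intro a
    rw [hys, mem_pvRuns_fst s a, hsdef, (PySem.List.sorted_perm FA (fun x => x) false).mem_iff,
      PySem.Set.mem_ofList]
  have hcand : PySem.List.sorted (PySem.Set.ofList FA) (fun x => x) = ys :=
    PySem.List.sorted_eq_of_perm_of_pairwise_lt _ ys (fun x => x) hperm hlt
  rw [hcand]
  have hcnt : ∀ p ∈ pvRuns s, (p.2 : Int) = ((FA.count p.1 : Nat) : Int) := by
    intro p hp
    rw [pvRuns_count s hsp p hp, hsdef,
      (PySem.List.sorted_perm FA (fun x => x) false).count_eq]
  have hstep :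
      (fun (st : List String × PySem.Dict (List String) Int) k =>
        if ((PySem.List.pyRange 0 (PySem.List.len buckets)).foldl
              (fun l i => (PySem.List.pyGetD buckets i []).foldl
                  (fun l j => if k == j then l + 1 else l) l) 0) ≥ minsupport then
          (st.1 ++ [k],
           st.2.insert [k]
             ((PySem.List.pyRange 0 (PySem.List.len buckets)).foldl
               (fun l i => (PySem.List.pyGetD buckets i []).foldl
                   (fun l j => if k == j then l + 1 else l) l) 0))
        else st)
      = (fun st k =>
          if ((FA.count k : Nat) : Int) ≥ minsupport then
            (st.1 ++ [k], st.2.insert [k] ((FA.count k : Nat) : Int))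
          else st) := by
    funext st k
    rw [countA buckets k]
  rw [hstep]
  have hl2 := loop2_eq minsupport (fun k => ((FA.count k : Nat) : Int)) ys []
    PySem.Dict.empty hnd (fun k _ => PySem.Dict.contains_empty [k])
  have hl3 := loop3_eq ys PySem.Dict.empty 1 hnd (fun k _ => PySem.Dict.contains_empty k)
  have hsw := sweep_spec minsupport s 1 PySem.Dict.empty [] PySem.Dict.empty hnd
    (fun k _ => PySem.Dict.contains_empty k) (fun k _ => PySem.Dict.contains_empty [k])
  have hfm := filter_map_fst minsupport (fun k => ((FA.count k : Nat) : Int)) (pvRuns s) hcnt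
  rw [hl3, hsw.1, hsw.2.1, hsw.2.2, hfm.1, hfm.2]
  rw [hl2.1, hl2.2]
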